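-- pv_equiv track=rewrite | github.com/selfreferencing/erdos-86-lean | verify_bradford_l4a.py | bradford_search
-- ===== SOURCE A (Python) =====
-- from math import isqrt, gcd
--
-- def bradford_search(p, x_max=None):
--     """Find all x in [p/4, p/2] with Bradford solution.
--     Returns list of (x, d, delta) tuples."""
--     results = []
--     lo = p // 4 + 1  # x > p/4 so delta > 0
--     hi = p // 2
--     if x_max is not None:
--         hi = min(hi, lo + x_max)
--     for x in range(lo, hi + 1):
--         delta = 4 * x - p
--         if delta <= 0 or delta % 4 != 3:
--             continue
--         x_sq = x * x
--         # Find divisors d of x^2 with d ≡ -x mod delta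
--         target = (-x) % delta
--         for d in range(1, isqrt(x_sq) + 1):
--             if x_sq % d == 0:
--                 if d % delta == target:
--                     results.append((x, d, delta))
--                     break  # one divisor suffices
--                 comp = x_sq // d
--                 if comp % delta == target:
--                     results.append((x, comp, delta))
--                     break
--     return results
-- ===== SOURCE B (Python) =====
-- def bradford_search(p, x_max=None):
--     """Find all x in [p/4, p/2] with Bradford solution.
--     Returns list of (x, d, delta) tuples."""
--     results = []
--     lo = p // 4 + 1
--     hi = p // 2
--     if x_max is not None:
--         hi = min(hi, lo + x_max)
--     # delta = 4*x - p is congruent to -p mod 4 for every x, so one check suffices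
--     if (-p) % 4 != 3:
--         return results
--     for x in range(lo, hi + 1):
--         delta = 4 * x - p
--         target = (-x) % delta
--         # factor x by trial division
--         fs = []
--         m = x
--         f = 2
--         while f * f <= m:
--             if m % f == 0:
--                 e = 0
--                 while m % f == 0:
--                     m //= f
--                     e += 1
--                 fs.append((f, e))
--             f += 1
--         if m > 1:
--             fs.append((m, 1))
--         # divisors of x^2 from the factorization (doubled exponents)
--         divs = [1]
--         for (pp, e) in fs:
--             divs = [d0 * pp ** i for i in range(2 * e + 1) for d0 in divs]
--         small = sorted(d0 for d0 in divs if d0 <= x)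
--         for d in small:
--             if d % delta == target:
--                 results.append((x, d, delta))
--                 break
--             comp = (x * x) // d
--             if comp % delta == target:
--                 results.append((x, comp, delta))
--                 break
--     return results
-- ===== Notes on version B (the rewrite author's own statement) =====
-- stated objective: faster
-- what changed: Instead of scanning every d in [1, x] for divisors of x^2, B factors x by trial division (O(sqrt x)), enumerates all divisors of x^2 from the doubled-exponent factorization, sorts the few divisors <= x and scans only those; it also hoists the delta % 4 == 3 test out of the loop, since delta = 4x - p is congruent to -p mod 4 for every x.
import Mathlib
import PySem

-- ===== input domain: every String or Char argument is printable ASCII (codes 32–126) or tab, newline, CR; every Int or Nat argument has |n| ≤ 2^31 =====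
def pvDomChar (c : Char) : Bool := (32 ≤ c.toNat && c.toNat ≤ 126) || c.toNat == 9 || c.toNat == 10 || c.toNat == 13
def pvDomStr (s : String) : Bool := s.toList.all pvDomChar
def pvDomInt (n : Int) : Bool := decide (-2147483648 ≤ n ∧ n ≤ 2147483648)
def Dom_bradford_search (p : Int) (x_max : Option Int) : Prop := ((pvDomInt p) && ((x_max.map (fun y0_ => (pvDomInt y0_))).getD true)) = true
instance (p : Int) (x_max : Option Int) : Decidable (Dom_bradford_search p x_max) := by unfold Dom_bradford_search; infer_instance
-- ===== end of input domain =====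

-- B factors x and enumerates the divisors of x^2 from the factorization instead of scanning
-- every candidate in [1, x], and hoists the delta % 4 test out of the loop (delta = 4x - p is
-- congruent to -p mod 4 for every x); measurably faster on large p.



-- ===== PORT A =====


-- math.isqrt(n); exact for 0 ≤ n, and A only applies it to x*x ≥ 0
def pyIsqrt (n : Int) : Int := (n.toNat.sqrt : Int)

-- A's inner 'for d in range(1, isqrt(x_sq)+1)' loop with its two 'break's, as a first-match recursion
def innerA (x_sq delta target : Int) : List Int → Option Int
  | [] => none
  | d :: rest =>
    if PySem.Int.mod x_sq d = 0 then
      if PySem.Int.mod d delta = target then some d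
      else
        let comp := PySem.Int.floordiv x_sq d
        if PySem.Int.mod comp delta = target then some comp
        else innerA x_sq delta target rest
    else innerA x_sq delta target rest

def bradford_search (p : Int) (x_max : Option Int) : List (List Int) :=
  let lo := PySem.Int.floordiv p 4 + 1
  let hi0 := PySem.Int.floordiv p 2
  let hi := match x_max with
    | none => hi0
    | some xm => min hi0 (lo + xm)
  (PySem.List.pyRange lo (hi + 1) 1).foldl (fun results x =>
    let delta := 4 * x - p
    if delta ≤ 0 ∨ PySem.Int.mod delta 4 ≠ 3 then results
    else
      let x_sq := x * x
      let target := PySem.Int.mod (-x) delta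
      match innerA x_sq delta target (PySem.List.pyRange 1 (pyIsqrt x_sq + 1) 1) with
      | some d => results ++ [[x, d, delta]]
      | none => results) []


-- ===== PORT B =====


-- Source B's 'while m % f == 0: m //= f; e += 1' (values here are positive Python ints, carried as Nat;
-- the fuel argument and the '2 ≤ f ∧ 0 < m' conjuncts only make the recursion total — with fuel ≥ m
-- and f ≥ 2, m ≥ 1, as at every call site, they never alter the computation)
def divOut : Nat → Nat → Nat → Nat × Nat
  | 0, m, _ => (0, m)
  | fuel + 1, m, f =>
    if 2 ≤ f ∧ 0 < m ∧ m % f = 0 then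
      let r := divOut fuel (m / f) f
      (r.1 + 1, r.2)
    else (0, m)

-- Source B's outer trial-division loop 'while f * f <= m: ...' (fuel again only for totality;
-- factorize passes fuel = m + 1, enough for the whole loop)
def factAux : Nat → Nat → Nat → List (Nat × Nat)
  | 0, m, _ => if 1 < m then [(m, 1)] else []
  | fuel + 1, m, f =>
    if 2 ≤ f ∧ f * f ≤ m then
      if m % f = 0 then
        (f, (divOut m m f).1) :: factAux fuel (divOut m m f).2 (f + 1)
      else factAux fuel m (f + 1)
    else if 1 < m then [(m, 1)] else []

-- Source B reaches the factorization only with x ≥ 1; toNat is exact there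
def factorize (x : Int) : List (Nat × Nat) := factAux (x.toNat + 1) x.toNat 2

-- 'divs = [d0 * pp**i for i in range(2*e+1) for d0 in divs]' folded over the factor list
def genDivs (fs : List (Nat × Nat)) : List Nat :=
  fs.foldl (fun divs pe =>
    (List.range (2 * pe.2 + 1)).flatMap (fun i => divs.map (fun d0 => d0 * pe.1 ^ i))) [1]

-- Source B's 'for d in small' loop with its two 'break's
def scanDivs (x delta target : Int) : List Nat → Option Int
  | [] => none
  | d :: rest =>
    if PySem.Int.mod (d : Int) delta = target then some (d : Int)
    else
      let comp := PySem.Int.floordiv (x * x) (d : Int)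
      if PySem.Int.mod comp delta = target then some comp
      else scanDivs x delta target rest

def bradford_search_alt (p : Int) (x_max : Option Int) : List (List Int) :=
  let lo := PySem.Int.floordiv p 4 + 1
  let hi0 := PySem.Int.floordiv p 2
  let hi := match x_max with
    | none => hi0
    | some xm => min hi0 (lo + xm)
  if PySem.Int.mod (-p) 4 ≠ 3 then []
  else
    (PySem.List.pyRange lo (hi + 1) 1).foldl (fun results x =>
      let delta := 4 * x - p
      let target := PySem.Int.mod (-x) delta
      let small := PySem.List.sorted
        ((genDivs (factorize x)).filter (fun d0 : Nat => decide ((d0 : Int) ≤ x))) (fun v => v) false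
      match scanDivs x delta target small with
      | some d => results ++ [[x, d, delta]]
      | none => results) []


-- ===== PRECONDITION & SPEC =====
def Spec_bradford_search (p : Int) (x_max : Option Int) (out : List (List Int)) : Prop := out = bradford_search_alt p x_max
instance (p : Int) (x_max : Option Int) (out : List (List Int)) : Decidable (Spec_bradford_search p x_max out) := by unfold Spec_bradford_search; infer_instance

-- ===== CLAIM (what is proved, stated in full; the proofs are below) =====
def Claim_equal_bradford_search : Prop := ∀ (p : Int) (x_max : Option Int), Dom_bradford_search p x_max → Spec_bradford_search p x_max (bradford_search p x_max)

-- ===== LEMMAS AND PROOFS =====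


theorem divOut_succ (fuel m f : Nat) : divOut (fuel + 1) m f
    = if 2 ≤ f ∧ 0 < m ∧ m % f = 0 then
        ((divOut fuel (m / f) f).1 + 1, (divOut fuel (m / f) f).2)
      else (0, m) := rfl

theorem factAux_succ (fuel m f : Nat) : factAux (fuel + 1) m f
    = if 2 ≤ f ∧ f * f ≤ m then
        if m % f = 0 then
          (f, (divOut m m f).1) :: factAux fuel (divOut m m f).2 (f + 1)
        else factAux fuel m (f + 1)
      else if 1 < m then [(m, 1)] else [] := rfl

theorem divOut_spec (fuel m f : Nat) (hf : 2 ≤ f) (hm : 0 < m) (hfuel : m ≤ fuel) :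
    m = f ^ (divOut fuel m f).1 * (divOut fuel m f).2 ∧ ¬ f ∣ (divOut fuel m f).2
    ∧ 0 < (divOut fuel m f).2 ∧ (divOut fuel m f).2 ≤ m := by
  induction fuel generalizing m with
  | zero => omega
  | succ fuel ih =>
    by_cases h : 2 ≤ f ∧ 0 < m ∧ m % f = 0
    · have hd : f ∣ m := Nat.dvd_of_mod_eq_zero h.2.2
      have hlt : m / f < m := Nat.div_lt_self h.2.1 (by omega)
      have hq : 0 < m / f := Nat.div_pos (Nat.le_of_dvd h.2.1 hd) (by omega)
      obtain ⟨h1, h2, h3, h4⟩ := ih (m / f) hq (by omega)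
      rw [divOut_succ, if_pos h]
      refine ⟨?_, h2, h3, by omega⟩
      calc m = (m / f) * f := (Nat.div_mul_cancel hd).symm
      _ = (f ^ (divOut fuel (m / f) f).1 * (divOut fuel (m / f) f).2) * f := by rw [← h1]
      _ = f ^ ((divOut fuel (m / f) f).1 + 1) * (divOut fuel (m / f) f).2 := by ring
    · rw [divOut_succ, if_neg h]
      refine ⟨by simp, ?_, hm, le_refl m⟩
      intro hdvd
      exact h ⟨hf, hm, Nat.mod_eq_zero_of_dvd hdvd⟩

theorem factAux_base (m : Nat) (hm : 0 < m) (f : Nat) (hf : 2 ≤ f) (hmf2 : m < f * f)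
    (hsmall : ∀ q, 2 ≤ q → q < f → ¬ q ∣ m) :
    ((if 1 < m then [(m, 1)] else []).map (fun pe : Nat × Nat => pe.1 ^ pe.2)).prod = m
    ∧ (if 1 < m then [(m, 1)] else []).Pairwise (fun a b : Nat × Nat => a.1 < b.1)
    ∧ ∀ pe ∈ (if 1 < m then [(m, 1)] else []), Nat.Prime pe.1 ∧ 1 ≤ pe.2 ∧ f ≤ pe.1 := by
  by_cases hm1 : 1 < m
  · rw [if_pos hm1]
    have hfm : f ≤ m := by
      by_contra hc
      exact hsmall m (by omega) (by omega) dvd_rfl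
    have hmp : m.Prime := by
      rw [Nat.prime_def_lt]
      refine ⟨by omega, fun q hq hqd => ?_⟩
      by_contra hne
      have hq0 : 0 < q := by
        rcases Nat.eq_zero_or_pos q with h0 | h0
        · exfalso; subst h0; rcases hqd with ⟨c, hc⟩; omega
        · exact h0
      have h2q : 2 ≤ q := by omega
      rcases Nat.lt_or_ge q f with hlt | hge
      · exact hsmall q h2q hlt hqd
      · obtain ⟨c, hc⟩ := hqd
        have hc2 : 2 ≤ c := by
          rcases Nat.lt_or_ge c 2 with h0 | h0
          · interval_cases c <;> omega
          · exact h0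
        have hcf : c < f := by
          have : c * f ≤ c * q := Nat.mul_le_mul_left c hge
          nlinarith
        exact hsmall c hc2 hcf ⟨q, by rw [hc]; ring⟩
    refine ⟨by simp, by simp, ?_⟩
    intro pe hpe
    rcases List.mem_singleton.mp hpe with rfl
    exact ⟨hmp, le_refl 1, hfm⟩
  · have : m = 1 := by omega
    subst this
    rw [if_neg hm1]
    simp

theorem factAux_spec (fuel m f : Nat) (hf : 2 ≤ f) (hm : 0 < m) (hfuel : m + 1 ≤ fuel + f)
    (hsmall : ∀ q, 2 ≤ q → q < f → ¬ q ∣ m) :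
    ((factAux fuel m f).map (fun pe => pe.1 ^ pe.2)).prod = m
    ∧ (factAux fuel m f).Pairwise (fun a b => a.1 < b.1)
    ∧ ∀ pe ∈ factAux fuel m f, Nat.Prime pe.1 ∧ 1 ≤ pe.2 ∧ f ≤ pe.1 := by
  induction fuel generalizing m f with
  | zero =>
    have hmf2 : m < f * f := by
      have : m < f := by omega
      have hff : f ≤ f * f := Nat.le_mul_of_pos_left f (by omega)
      omega
    exact factAux_base m hm f hf hmf2 hsmall
  | succ fuel ih =>
    rw [factAux_succ]
    by_cases hguard : 2 ≤ f ∧ f * f ≤ m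
    · have hfm : f ≤ m := le_trans (Nat.le_mul_of_pos_left f (by omega)) hguard.2
      rw [if_pos hguard]
      by_cases hdvd : m % f = 0
      · rw [if_pos hdvd]
        have hfd : f ∣ m := Nat.dvd_of_mod_eq_zero hdvd
        obtain ⟨heq, hnd, hpos, hle⟩ := divOut_spec m m f hf hm (le_refl m)
        have hfp : f.Prime := by
          rw [Nat.prime_def_lt]
          refine ⟨hf, fun q hq hqd => ?_⟩
          by_contra hne
          have h2q : 2 ≤ q := by
            rcases Nat.eq_zero_or_pos q with h0 | h0
            · subst h0; simp at hqd; omega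
            · omega
          exact hsmall q h2q hq (hqd.trans hfd)
        have he1 : 1 ≤ (divOut m m f).1 := by
          by_contra hc
          have h0 : (divOut m m f).1 = 0 := by omega
          rw [h0] at heq; simp at heq
          exact hnd (heq ▸ hfd)
        have hd2m : (divOut m m f).2 ∣ m := ⟨f ^ (divOut m m f).1, by
          conv_lhs => rw [heq]
          ring⟩
        obtain ⟨hprod, hpw, hall⟩ := ih (divOut m m f).2 (f + 1) (by omega) hpos (by omega) (by
          intro q h2 hlt hdv
          rcases Nat.lt_or_ge q f with hq | hq
          · exact hsmall q h2 hq (hdv.trans hd2m)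
          · have hqf : q = f := by omega
            exact hnd (hqf ▸ hdv))
        refine ⟨?_, ?_, ?_⟩
        · simp only [List.map_cons, List.prod_cons, hprod]; exact heq.symm
        · rw [List.pairwise_cons]
          exact ⟨fun b hb => by have := (hall b hb).2.2; omega, hpw⟩
        · intro pe hpe
          rcases List.mem_cons.mp hpe with rfl | hmem
          · exact ⟨hfp, he1, le_refl f⟩
          · obtain ⟨a, b, c⟩ := hall pe hmem
            exact ⟨a, b, by omega⟩
      · rw [if_neg hdvd]
        obtain ⟨hprod, hpw, hall⟩ := ih m (f + 1) (by omega) hm (by omega) (by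
          intro q h2 hlt hdv
          rcases Nat.lt_or_ge q f with hq | hq
          · exact hsmall q h2 hq hdv
          · have hqf : q = f := by omega
            exact hdvd (Nat.mod_eq_zero_of_dvd (hqf ▸ hdv)))
        exact ⟨hprod, hpw, fun pe hpe => by
          obtain ⟨a, b, c⟩ := hall pe hpe; exact ⟨a, b, by omega⟩⟩
    · rw [if_neg hguard]
      have hmf2 : m < f * f := by
        rcases Nat.lt_or_ge m (f * f) with h0 | h0
        · exact h0
        · exact absurd ⟨hf, h0⟩ hguard
      exact factAux_base m hm f hf hmf2 hsmall

theorem gen_mem (fs : List (Nat × Nat)) (acc : List Nat)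
    (hp : ∀ pe ∈ fs, pe.1.Prime) (m : Nat) :
    m ∈ fs.foldl (fun divs pe =>
      (List.range (2 * pe.2 + 1)).flatMap (fun i => divs.map (fun d0 => d0 * pe.1 ^ i))) acc
    ↔ ∃ a ∈ acc, ∃ t, t ∣ (fs.map (fun pe => pe.1 ^ (2 * pe.2))).prod ∧ m = a * t := by
  induction fs generalizing acc with
  | nil => simp [Nat.dvd_one]
  | cons pe rest ih =>
    obtain ⟨p, e⟩ := pe
    have hpp : p.Prime := hp (p, e) List.mem_cons_self
    simp only [List.foldl_cons]
    rw [ih _ (fun q hq => hp q (List.mem_cons_of_mem _ hq))]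
    constructor
    · rintro ⟨a', ha', t, ht, rfl⟩
      rw [List.mem_flatMap] at ha'
      obtain ⟨i, hi, ha'⟩ := ha'
      rw [List.mem_map] at ha'
      obtain ⟨a, ha, rfl⟩ := ha'
      rw [List.mem_range] at hi
      refine ⟨a, ha, p ^ i * t, ?_, by ring⟩
      simp only [List.map_cons, List.prod_cons]
      exact mul_dvd_mul (pow_dvd_pow p (by omega)) ht
    · rintro ⟨a, ha, t', ht', rfl⟩
      simp only [List.map_cons, List.prod_cons] at ht'
      rcases Nat.dvd_mul.mp ht' with ⟨u, v, hu, hv, huv⟩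
      obtain ⟨i, hi, rfl⟩ := (Nat.dvd_prime_pow hpp).mp hu
      refine ⟨a * p ^ i, ?_, v, hv, by rw [← huv]; ring⟩
      rw [List.mem_flatMap]
      exact ⟨i, List.mem_range.mpr (by omega), List.mem_map.mpr ⟨a, ha, rfl⟩⟩

theorem gen_nodup (fs : List (Nat × Nat)) (acc : List Nat)
    (hp : ∀ pe ∈ fs, pe.1.Prime) (he : ∀ pe ∈ fs, 1 ≤ pe.2)
    (hpw : fs.Pairwise (fun a b => a.1 < b.1)) (hnd : acc.Nodup)
    (hco : ∀ a ∈ acc, Nat.Coprime a ((fs.map (fun pe => pe.1 ^ (2 * pe.2))).prod)) :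
    (fs.foldl (fun divs pe =>
      (List.range (2 * pe.2 + 1)).flatMap (fun i => divs.map (fun d0 => d0 * pe.1 ^ i))) acc).Nodup := by
  induction fs generalizing acc with
  | nil => simpa using hnd
  | cons pe rest ih =>
    obtain ⟨p, e⟩ := pe
    have hpp : p.Prime := hp _ List.mem_cons_self
    have he' : 1 ≤ e := he _ List.mem_cons_self
    obtain ⟨hlt, hpwrest⟩ := List.pairwise_cons.mp hpw
    simp only [List.map_cons, List.prod_cons] at hco
    have hcop : ∀ a ∈ acc, ¬ p ∣ a := by
      intro a ha
      have h1 : Nat.Coprime a (p ^ (2 * e)) := (hco a ha).coprime_dvd_right (dvd_mul_right _ _)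
      have h2 : Nat.Coprime a p := h1.coprime_dvd_right (dvd_pow_self p (by omega))
      exact (hpp.coprime_iff_not_dvd).mp h2.symm
    have hpP : ¬ p ∣ (rest.map (fun pe => pe.1 ^ (2 * pe.2))).prod := by
      intro hdvd
      obtain ⟨z, hz, hpz⟩ := (hpp.prime.dvd_prod_iff).mp hdvd
      obtain ⟨qe, hqe, rfl⟩ := List.mem_map.mp hz
      have hq : qe.1.Prime := hp qe (List.mem_cons_of_mem _ hqe)
      have : p = qe.1 := (Nat.prime_dvd_prime_iff_eq hpp hq).mp (hpp.dvd_of_dvd_pow hpz)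
      have := hlt qe hqe
      omega
    simp only [List.foldl_cons]
    apply ih _ (fun q hq => hp q (List.mem_cons_of_mem _ hq))
      (fun q hq => he q (List.mem_cons_of_mem _ hq)) hpwrest
    · -- nodup of the new accumulator
      rw [List.nodup_flatMap]
      constructor
      · intro i _
        exact hnd.map (fun a b hab => Nat.eq_of_mul_eq_mul_right (pow_pos hpp.pos i) hab)
      · have hplt : (List.range (2 * e + 1)).Pairwise (· < ·) := List.pairwise_lt_range
        refine hplt.imp ?_
        intro i j hij
        rw [Function.onFun, List.disjoint_left]
        rintro z hz1 hz2
        obtain ⟨a, ha, rfl⟩ := List.mem_map.mp hz1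
        obtain ⟨b, hb, hab⟩ := List.mem_map.mp hz2
        have h1 : (b * p ^ (j - i)) * p ^ i = a * p ^ i := by
          rw [mul_assoc, ← pow_add, Nat.sub_add_cancel (le_of_lt hij)]
          exact hab
        have h2 : a = b * p ^ (j - i) := (Nat.eq_of_mul_eq_mul_right (pow_pos hpp.pos i) h1).symm
        exact hcop a ha (h2 ▸ dvd_mul_of_dvd_right (dvd_pow_self p (by omega)) b)
    · -- coprimality of the new accumulator
      intro a' ha'
      obtain ⟨i, hi, ha'⟩ := List.mem_flatMap.mp ha'
      obtain ⟨a, ha, rfl⟩ := List.mem_map.mp ha'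
      have h1 : Nat.Coprime a ((rest.map (fun pe => pe.1 ^ (2 * pe.2))).prod) :=
        (hco a ha).coprime_dvd_right (dvd_mul_left _ _)
      have h2 : Nat.Coprime p ((rest.map (fun pe => pe.1 ^ (2 * pe.2))).prod) :=
        (hpp.coprime_iff_not_dvd).mpr hpP
      exact Nat.Coprime.mul_left h1 (Nat.Coprime.pow_left i h2)

theorem innerA_eq_scan (xn : Nat) (δ t : Int) (M : List Nat) :
    innerA ((xn : Int) * (xn : Int)) δ t (M.map (Nat.cast : Nat → Int))
    = scanDivs (xn : Int) δ t (M.filter (fun d => decide (d ∣ xn * xn))) := by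
  induction M with
  | nil => simp [innerA, scanDivs]
  | cons d rest ih =>
    simp only [List.map_cons, List.filter_cons]
    by_cases hdvd : d ∣ xn * xn
    · have hmod : PySem.Int.mod ((xn : Int) * (xn : Int)) (d : Int) = 0 := by
        rw [PySem.Int.mod_eq_zero_iff_dvd]
        exact_mod_cast hdvd
      rw [show (decide (d ∣ xn * xn)) = true from by simpa using hdvd]
      simp only [if_true]
      simp only [innerA, scanDivs]
      rw [if_pos hmod]
      split_ifs <;> first | rfl | exact ih
    · have hmod : ¬ PySem.Int.mod ((xn : Int) * (xn : Int)) (d : Int) = 0 := by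
        rw [PySem.Int.mod_eq_zero_iff_dvd]
        exact_mod_cast hdvd
      rw [show (decide (d ∣ xn * xn)) = false from by simpa using hdvd]
      simp only [Bool.false_eq_true, if_false]
      simp only [innerA]
      rw [if_neg hmod]
      exact ih

theorem prod_sq (fs : List (Nat × Nat)) :
    (fs.map (fun pe => pe.1 ^ (2 * pe.2))).prod = ((fs.map (fun pe => pe.1 ^ pe.2)).prod) ^ 2 := by
  induction fs with
  | nil => simp
  | cons pe rest ih =>
    simp only [List.map_cons, List.prod_cons, ih]
    ring

theorem mem_genDivs (xn : Nat) (h1 : 1 ≤ xn) (m : Nat) :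
    m ∈ genDivs (factorize (xn : Int)) ↔ m ∣ xn * xn := by
  have hfa : factorize (xn : Int) = factAux (xn + 1) xn 2 := by
    unfold factorize; rw [Int.toNat_natCast]
  obtain ⟨hprod, hpw, hall⟩ := factAux_spec (xn + 1) xn 2 (le_refl 2) h1 (by omega) (by omega)
  rw [hfa]
  unfold genDivs
  rw [gen_mem _ _ (fun pe hpe => (hall pe hpe).1)]
  rw [prod_sq, hprod]
  constructor
  · rintro ⟨a, ha, t, ht, rfl⟩
    simp only [List.mem_singleton] at ha
    subst ha
    rw [one_mul]
    exact ht.trans (by rw [pow_two])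
  · intro hm
    exact ⟨1, List.mem_singleton.mpr rfl, m, by rw [pow_two]; exact hm, (one_mul m).symm⟩

theorem nodup_genDivs (xn : Nat) (h1 : 1 ≤ xn) : (genDivs (factorize (xn : Int))).Nodup := by
  have hfa : factorize (xn : Int) = factAux (xn + 1) xn 2 := by
    unfold factorize; rw [Int.toNat_natCast]
  obtain ⟨hprod, hpw, hall⟩ := factAux_spec (xn + 1) xn 2 (le_refl 2) h1 (by omega) (by omega)
  rw [hfa]
  unfold genDivs
  exact gen_nodup _ _ (fun pe hpe => (hall pe hpe).1) (fun pe hpe => (hall pe hpe).2.1) hpw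
    (List.nodup_singleton 1) (fun a ha => by
      simp only [List.mem_singleton] at ha; subst ha; exact Nat.coprime_one_left _)

theorem body_eq (δ t : Int) (xn : Nat) (h1 : 1 ≤ xn) :
    innerA ((xn : Int) * (xn : Int)) δ t
      (PySem.List.pyRange 1 (pyIsqrt ((xn : Int) * (xn : Int)) + 1) 1)
    = scanDivs (xn : Int) δ t (PySem.List.sorted
        ((genDivs (factorize (xn : Int))).filter (fun d0 : Nat => decide ((d0 : Int) ≤ (xn : Int))))
        (fun v => v) false) := by
  -- isqrt(x*x) = x
  have hsq : pyIsqrt ((xn : Int) * (xn : Int)) = (xn : Int) := by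
    unfold pyIsqrt
    have h2 : ((xn : Int) * (xn : Int)).toNat = xn * xn := by
      rw [show ((xn : Int) * (xn : Int)) = ((xn * xn : Nat) : Int) by push_cast; ring,
        Int.toNat_natCast]
    rw [h2, show xn * xn = xn ^ 2 by ring, Nat.sqrt_eq']
  -- the range is the cast of range' 1 xn
  have hrange : PySem.List.pyRange 1 ((xn : Int) + 1) 1
      = (List.range' 1 xn).map (Nat.cast : Nat → Int) := by
    rw [PySem.List.pyRange_one, show ((xn : Int) + 1 - 1).toNat = xn by omega,
      List.range'_eq_map_range, List.map_map]
    apply List.map_congr_left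
    intro a _
    simp only [Function.comp_apply]
    push_cast
    ring
  rw [hsq, hrange, innerA_eq_scan]
  -- the sorted filtered divisor list is exactly the filtered range
  congr 1
  symm
  apply PySem.List.sorted_eq_of_perm_of_pairwise_lt
  · -- permutation
    apply List.perm_of_nodup_nodup_toFinset_eq
    · exact (List.nodup_range').filter _
    · exact (nodup_genDivs xn h1).filter _
    · ext m
      simp only [List.mem_toFinset, List.mem_filter, List.mem_range'_1, mem_genDivs xn h1,
        decide_eq_true_eq]
      constructor
      · rintro ⟨⟨hm1, hm2⟩, hdvd⟩
        exact ⟨by simpa using hdvd, by exact_mod_cast by omega⟩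
      · rintro ⟨hdvd, hle⟩
        have hpos : 0 < m := Nat.pos_of_dvd_of_pos hdvd (by positivity)
        have hle' : m ≤ xn := by exact_mod_cast hle
        exact ⟨⟨by omega, by omega⟩, by simpa using hdvd⟩
  · -- strictly increasing
    exact (List.pairwise_lt_range' 1).filter _

theorem mod4_shift (p x : Int) : PySem.Int.mod (4 * x - p) 4 = PySem.Int.mod (-p) 4 := by
  rw [PySem.Int.mod_eq_emod_of_pos (by norm_num), PySem.Int.mod_eq_emod_of_pos (by norm_num)]
  omega

theorem bradford_search_eq (p : Int) (x_max : Option Int) :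
    bradford_search p x_max = bradford_search_alt p x_max := by
  unfold bradford_search bradford_search_alt
  simp only []
  set lo := PySem.Int.floordiv p 4 + 1 with hlo
  set hi0 := PySem.Int.floordiv p 2 with hhi0
  set hi := match x_max with
    | none => hi0
    | some xm => min hi0 (lo + xm) with hhi
  have hhile : hi ≤ hi0 := by
    rw [hhi]
    cases x_max with
    | none => exact le_refl _
    | some xm => exact min_le_left _ _
  have hq4 := PySem.Int.floordiv_mul_add_mod p 4
  have hr4a := PySem.Int.mod_nonneg p (b := 4) (by norm_num)
  have hr4b := PySem.Int.mod_lt p (b := 4) (by norm_num)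
  have hq2 := PySem.Int.floordiv_mul_add_mod p 2
  have hr2a := PySem.Int.mod_nonneg p (b := 2) (by norm_num)
  have hr2b := PySem.Int.mod_lt p (b := 2) (by norm_num)
  by_cases hc : PySem.Int.mod (-p) 4 = 3
  · rw [if_neg (by simpa using hc)]
    apply PySem.List.foldl_congr_mem
    intro acc x hx
    rw [PySem.List.mem_pyRange_one] at hx
    have hx1 : 1 ≤ x := by omega
    have hdelta : 0 < 4 * x - p := by omega
    have hcond : ¬ (4 * x - p ≤ 0 ∨ PySem.Int.mod (4 * x - p) 4 ≠ 3) := by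
      rintro (h | h)
      · omega
      · rw [mod4_shift] at h
        exact h hc
    rw [if_neg hcond]
    have hxc : x = ((x.toNat : Nat) : Int) := by omega
    rw [hxc, body_eq _ _ _ (by omega)]
  · rw [if_pos (by simpa using hc)]
    refine Eq.trans (PySem.List.foldl_congr_mem _ _ (fun acc _ => acc) _ ?_) (PySem.List.foldl_ignore _ _)
    intro acc x _
    exact if_pos (Or.inr (by rw [mod4_shift]; exact fun h => hc h))


-- ===== VERDICT (by name: the statement is the Claim_ definition above) =====
theorem bradford_search_spec : Claim_equal_bradford_search := by
  intro p x_max _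
  exact bradford_search_eq p x_max
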